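-- pv_equiv track=rewrite | github.com/Kayto/Husky-Hunter | Progs/image_writer/png2hba.py | to_runs
-- ===== SOURCE A (Python) =====
-- def to_runs(bitmap):
--     """Bitmap -> list of (y, x_start, x_end) horizontal runs of set pixels."""
--     runs = []
--     for y, row in enumerate(bitmap):
--         x = 0
--         while x < len(row):
--             if row[x]:
--                 xs = x
--                 while x < len(row) and row[x]:
--                     x += 1
--                 runs.append((y, xs, x - 1))
--             else:
--                 x += 1
--     return runs
-- ===== SOURCE B (Python) =====
-- def to_runs(bitmap):
--     """Bitmap -> list of (y, x_start, x_end) horizontal runs of set pixels."""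
--     runs = []
--     for y, row in enumerate(bitmap):
--         xs = [x for x, px in enumerate(row) if px]
--         starts = [x for p, x in zip([None] + xs, xs) if p != x - 1]
--         ends = [x for x, n in zip(xs, xs[1:] + [None]) if n != x + 1]
--         runs += [(y, s, e) for s, e in zip(starts, ends)]
--     return runs
-- ===== Notes on version B (the rewrite author's own statement) =====
-- stated objective: alternative
-- what changed: B replaces A's index-advancing nested while-scan by staged passes: it first collects the positions of set pixels per row, then detects run starts and ends as boundary positions via shifted zips, and zips starts with ends into the runs.
import Mathlib
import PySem

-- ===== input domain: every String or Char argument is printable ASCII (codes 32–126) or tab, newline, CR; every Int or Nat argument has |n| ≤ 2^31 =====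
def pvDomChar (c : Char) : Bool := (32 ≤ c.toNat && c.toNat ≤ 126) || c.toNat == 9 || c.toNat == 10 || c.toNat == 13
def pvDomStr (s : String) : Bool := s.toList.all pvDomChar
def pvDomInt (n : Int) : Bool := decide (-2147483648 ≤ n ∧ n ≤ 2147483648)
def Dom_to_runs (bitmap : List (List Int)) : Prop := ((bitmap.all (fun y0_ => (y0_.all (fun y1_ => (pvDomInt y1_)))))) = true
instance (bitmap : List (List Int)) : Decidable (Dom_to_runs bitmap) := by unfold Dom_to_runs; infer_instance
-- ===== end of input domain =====

-- B replaces A's index-advancing nested while-scan by staged passes per row: collect the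
-- positions of set pixels, detect run starts/ends as boundary positions via shifted zips,
-- and zip starts with ends. Same results, same O(n) cost.

-- ===== PORT A =====
-- inner while loop: `while x < len(row) and row[x]: x += 1`
def to_runs_inner (row : List Int) (x : Nat) : Nat :=
  if h : x < row.length ∧ row.getD x 0 ≠ 0 then to_runs_inner row (x + 1) else x
termination_by row.length - x
decreasing_by omega

theorem to_runs_inner_ge (row : List Int) (x : Nat) : x ≤ to_runs_inner row x := by
  unfold to_runs_inner
  split
  · exact Nat.le_trans (Nat.le_succ x) (to_runs_inner_ge row (x + 1))
  · exact Nat.le_refl x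
termination_by row.length - x
decreasing_by omega

theorem to_runs_inner_gt (row : List Int) (x : Nat)
    (h1 : x < row.length) (h2 : row.getD x 0 ≠ 0) : x < to_runs_inner row x := by
  rw [to_runs_inner, dif_pos ⟨h1, h2⟩]
  exact Nat.lt_of_lt_of_le (Nat.lt_succ_self x) (to_runs_inner_ge row (x + 1))

-- outer while loop over x, appending a run when row[x] is truthy
def to_runs_outer (y : Int) (row : List Int) (runs : List (Int × Int × Int)) (x : Nat) :
    List (Int × Int × Int) :=
  if h : x < row.length then
    if h2 : row.getD x 0 ≠ 0 then
      let x' := to_runs_inner row x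
      to_runs_outer y row (runs ++ [(y, (x : Int), (x' : Int) - 1)]) x'
    else to_runs_outer y row runs (x + 1)
  else runs
termination_by row.length - x
decreasing_by
  · have := to_runs_inner_gt row x h h2; omega
  · omega

def to_runs (bitmap : List (List Int)) : List (Int × Int × Int) :=
  (PySem.List.enumerate bitmap 0).foldl (fun runs p => to_runs_outer p.1 p.2 runs 0) []

-- ===== PORT B =====
-- per row: xs = [x for x, px in enumerate(row) if px];
--          starts = [x for p, x in zip([None] + xs, xs) if p != x - 1];
--          ends = [x for x, n in zip(xs, xs[1:] + [None]) if n != x + 1];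
--          runs += [(y, s, e) for s, e in zip(starts, ends)]
def to_runs_alt (bitmap : List (List Int)) : List (Int × Int × Int) :=
  (PySem.List.enumerate bitmap 0).foldl
    (fun runs p =>
      let y := p.1
      let row := p.2
      let xs := (PySem.List.enumerate row 0).filterMap
        (fun q => if q.2 ≠ 0 then some q.1 else none)
      let starts := ((none :: xs.map some).zip xs).filterMap
        (fun q => if q.1 ≠ some (q.2 - 1) then some q.2 else none)
      let ends := (xs.zip (xs.tail.map some ++ [none])).filterMap
        (fun q => if q.2 ≠ some (q.1 + 1) then some q.1 else none)
      runs ++ (starts.zip ends).map (fun q => (y, q.1, q.2)))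
    []

-- ===== PRECONDITION & SPEC =====
def Spec_to_runs (bitmap : List (List Int)) (out : List (Int × Int × Int)) : Prop := out = to_runs_alt bitmap
instance (bitmap : List (List Int)) (out : List (Int × Int × Int)) : Decidable (Spec_to_runs bitmap out) := by unfold Spec_to_runs; infer_instance

-- ===== CLAIM (what is proved, stated in full; the proofs are below) =====
def Claim_equal_to_runs : Prop := ∀ (bitmap : List (List Int)), Dom_to_runs bitmap → Spec_to_runs bitmap (to_runs bitmap)

-- ===== LEMMAS AND PROOFS =====

-- reference function for A: runs of the suffix of a row starting at index x
def paRuns (y : Int) (x : Nat) : List Int → List (Int × Int × Int)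
  | [] => []
  | a :: t =>
    if a = 0 then paRuns y (x + 1) t
    else
      let k := (t.takeWhile (· != 0)).length
      (y, (x : Int), (x : Int) + k) :: paRuns y (x + 1 + k) (t.drop k)
termination_by l => l.length

-- positions of the nonzero entries of a row, counting from index x
def pvPos : List Int → Nat → List Int
  | [], _ => []
  | a :: t, x => if a ≠ 0 then (x : Int) :: pvPos t (x + 1) else pvPos t (x + 1)

-- recursive form of B's starts comprehension (p = previous position, if any)
def pvS : Option Int → List Int → List Int
  | _, [] => []
  | p, a :: t => if p ≠ some (a - 1) then a :: pvS (some a) t else pvS (some a) t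

-- recursive form of B's ends comprehension
def pvE : List Int → List Int
  | [] => []
  | [a] => [a]
  | a :: b :: t => if b ≠ a + 1 then a :: pvE (b :: t) else pvE (b :: t)

-- B's per-row result, computed from the positions list
def pvRow (y : Int) (xs : List Int) : List (Int × Int × Int) :=
  ((pvS none xs).zip (pvE xs)).map (fun q => (y, q.1, q.2))

-- a block of consecutive positions s, s+1, …, s+n-1
def pvBlk : Nat → Int → List Int
  | 0, _ => []
  | n + 1, s => s :: pvBlk n (s + 1)

theorem enum_filter (l : List Int) (x : Nat) :
    (PySem.List.enumerate l (x : Int)).filterMap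
        (fun q => if q.2 ≠ 0 then some q.1 else none)
      = pvPos l x := by
  induction l generalizing x with
  | nil => simp [PySem.List.enumerate_nil, pvPos]
  | cons a t ih =>
    rw [PySem.List.enumerate_cons, pvPos]
    have := ih (x + 1)
    push_cast at this ⊢
    by_cases ha : a = 0 <;> simpa [List.filterMap_cons, ha] using this

theorem zipS (xs : List Int) (p : Option Int) :
    ((p :: xs.map some).zip xs).filterMap
        (fun q => if q.1 ≠ some (q.2 - 1) then some q.2 else none)
      = pvS p xs := by
  induction xs generalizing p with
  | nil => simp [pvS]
  | cons a t ih =>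
    rw [pvS]
    simp only [List.map_cons, List.zip_cons_cons, List.filterMap_cons]
    by_cases hp : p = some (a - 1) <;> simpa [hp] using ih (some a)

theorem zipE (xs : List Int) :
    (xs.zip (xs.tail.map some ++ [none])).filterMap
        (fun q => if q.2 ≠ some (q.1 + 1) then some q.1 else none)
      = pvE xs := by
  induction xs with
  | nil => rfl
  | cons a t ih =>
    cases t with
    | nil => simp [pvE]
    | cons b t' =>
      rw [pvE]
      simp only [List.tail_cons, List.map_cons, List.cons_append, List.zip_cons_cons,
        List.filterMap_cons] at ih ⊢
      by_cases hb : b = a + 1 <;> simpa [hb] using ih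

theorem pvPos_lb (l : List Int) (x : Nat) (z : Int) (hz : z ∈ pvPos l x) : (x : Int) ≤ z := by
  induction l generalizing x with
  | nil => simp [pvPos] at hz
  | cons a t ih =>
    rw [pvPos] at hz
    by_cases ha : a = 0
    · simp only [ha, ne_eq, not_true_eq_false, if_false] at hz
      have := ih (x + 1) hz
      push_cast at this; omega
    · simp only [ha, if_true, ne_eq, not_false_iff, List.mem_cons] at hz
      rcases hz with h | h
      · omega
      · have := ih (x + 1) h
        push_cast at this; omega

theorem pvPos_blk (l : List Int) (x : Nat) :
    pvPos l x = pvBlk (l.takeWhile (· != 0)).length (x : Int)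
        ++ pvPos (l.drop (l.takeWhile (· != 0)).length) (x + (l.takeWhile (· != 0)).length) := by
  induction l generalizing x with
  | nil => simp [pvPos, pvBlk]
  | cons a t ih =>
    by_cases ha : a = 0
    · rw [List.takeWhile_cons_of_neg (by simp [ha])]
      simp [pvBlk]
    · rw [List.takeWhile_cons_of_pos (by simp [ha])]
      rw [pvPos]
      simp only [ha, ne_eq, not_false_iff, if_true, List.length_cons, List.drop_succ_cons]
      rw [ih (x + 1), pvBlk]
      push_cast
      have : x + 1 + (t.takeWhile (· != 0)).length = x + ((t.takeWhile (· != 0)).length + 1) := by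
        omega
      rw [this]
      simp [add_comm]

theorem pvPos_gap (t : List Int) (x : Nat) (z : Int)
    (hz : z ∈ pvPos (t.drop (t.takeWhile (· != 0)).length) (x + (t.takeWhile (· != 0)).length)) :
    (x : Int) + (t.takeWhile (· != 0)).length < z := by
  induction t generalizing x with
  | nil => simp [pvPos] at hz
  | cons a t' ih =>
    by_cases ha : a = 0
    · rw [List.takeWhile_cons_of_neg (by simp [ha])] at hz ⊢
      simp only [List.length_nil, Nat.add_zero, List.drop_zero] at hz
      simp only [List.length_nil] 
      rw [pvPos] at hz
      simp only [ha, ne_eq, not_true_eq_false, if_false] at hz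
      have := pvPos_lb _ _ _ hz
      push_cast at this ⊢; omega
    · rw [List.takeWhile_cons_of_pos (by simp [ha])] at hz ⊢
      simp only [List.length_cons, List.drop_succ_cons] at hz ⊢
      have : x + ((t'.takeWhile (· != 0)).length + 1)
          = (x + 1) + (t'.takeWhile (· != 0)).length := by omega
      rw [this] at hz
      have := ih (x + 1) hz
      push_cast at this ⊢; omega

theorem pvS_skip (q : Int) (rest : List Int) (h : ∀ z ∈ rest, q + 1 < z) :
    pvS (some q) rest = pvS none rest := by
  cases rest with
  | nil => rfl
  | cons r t =>
    have hr : q + 1 < r := h r (List.mem_cons_self)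
    rw [pvS, pvS]
    have : ¬ (some q = some (r - 1)) := by
      intro hc
      have : q = r - 1 := Option.some.inj hc
      omega
    simp [this]

theorem pvS_blk_aux (n : Nat) (s : Int) (rest : List Int)
    (h : ∀ z ∈ rest, s + n < z) :
    pvS (some (s - 1)) (pvBlk n s ++ rest) = pvS none rest := by
  induction n generalizing s with
  | zero =>
    rw [pvBlk, List.nil_append]
    exact pvS_skip (s - 1) rest (fun z hz => by have := h z hz; push_cast at this; omega)
  | succ n ih =>
    rw [pvBlk, List.cons_append, pvS]
    simp only [ne_eq, not_true_eq_false, if_false]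
    have : (s : Int) = (s + 1) - 1 := by ring
    rw [show pvS (some s) (pvBlk n (s + 1) ++ rest) = pvS (some ((s + 1) - 1)) (pvBlk n (s + 1) ++ rest) by rw [← this]]
    exact ih (s + 1) (fun z hz => by have := h z hz; push_cast at this ⊢; omega)

theorem pvS_blk (n : Nat) (s : Int) (rest : List Int)
    (h : ∀ z ∈ rest, s + n + 1 < z) :
    pvS none (pvBlk (n + 1) s ++ rest) = s :: pvS none rest := by
  rw [pvBlk, List.cons_append, pvS]
  simp only [ne_eq, reduceCtorEq, not_false_iff, if_true]
  congr 1
  have : (s : Int) = (s + 1) - 1 := by ring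
  rw [show pvS (some s) (pvBlk n (s + 1) ++ rest) = pvS (some ((s + 1) - 1)) (pvBlk n (s + 1) ++ rest) by rw [← this]]
  exact pvS_blk_aux n (s + 1) rest (fun z hz => by have := h z hz; push_cast at this ⊢; omega)

theorem pvE_blk (n : Nat) (s : Int) (rest : List Int)
    (h : ∀ z ∈ rest, s + n + 1 < z) :
    pvE (pvBlk (n + 1) s ++ rest) = (s + n) :: pvE rest := by
  induction n generalizing s with
  | zero =>
    rw [pvBlk, pvBlk, List.cons_append, List.nil_append]
    cases rest with
    | nil => simp [pvE]
    | cons r t =>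
      have hr : s + 1 < r := by have := h r (List.mem_cons_self); push_cast at this; omega
      rw [pvE]
      have : r ≠ s + 1 := by omega
      simp [this]
  | succ n ih =>
    rw [pvBlk, pvBlk, List.cons_append, List.cons_append, pvE]
    simp only [ne_eq, not_true_eq_false, if_false]
    rw [← List.cons_append, ← pvBlk]
    rw [ih (s + 1) (fun z hz => by have := h z hz; push_cast at this ⊢; omega)]
    congr 1
    push_cast; ring

theorem pvRow_eq (y : Int) (l : List Int) (x : Nat) :
    pvRow y (pvPos l x) = paRuns y x l := by
  match l with
  | [] => rw [pvPos, paRuns]; rfl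
  | a :: t =>
    by_cases ha : a = 0
    · rw [pvPos, paRuns]
      simp only [ha, ne_eq, not_true_eq_false, if_false]
      exact pvRow_eq y t (x + 1)
    · rw [pvPos, paRuns]
      simp only [ha, ne_eq, not_false_iff, if_true, ite_false]
      set k := (t.takeWhile (· != 0)).length with hk
      have hdec : pvPos (a :: t) x = pvBlk (k + 1) (x : Int) ++ pvPos (t.drop k) (x + 1 + k) := by
        rw [pvPos]
        simp only [ha, ne_eq, not_false_iff, if_true]
        rw [pvPos_blk t (x + 1), ← hk, pvBlk, List.cons_append]
        push_cast
        rfl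
      have hgap : ∀ z ∈ pvPos (t.drop k) (x + 1 + k), (x : Int) + k + 1 < z := by
        intro z hz
        have : (x + 1) + k = x + 1 + k := rfl
        have hg := pvPos_gap t (x + 1) z (by rw [← hk] at *; exact hz)
        push_cast at hg ⊢; omega
      rw [pvPos] at hdec
      simp only [ha, ne_eq, not_false_iff, if_true] at hdec
      unfold pvRow
      rw [show ((x:Int) :: pvPos t (x+1)) = pvBlk (k+1) (x:Int) ++ pvPos (t.drop k) (x+1+k) from hdec]
      rw [pvS_blk k (x : Int) _ hgap, pvE_blk k (x : Int) _ hgap]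
      rw [List.zip_cons_cons, List.map_cons]
      have hrec := pvRow_eq y (t.drop k) (x + 1 + k)
      unfold pvRow at hrec
      rw [hrec]
termination_by l.length
decreasing_by
  · simp
  · simp only [List.length_drop, List.length_cons]
    omega

-- ===== A-side characterisation (from the ports' loops) =====

theorem inner_spec (row : List Int) (x : Nat) :
    to_runs_inner row x = x + ((row.drop x).takeWhile (· != 0)).length := by
  rw [to_runs_inner]
  split
  next h =>
    obtain ⟨h1, h2⟩ := h
    rw [inner_spec row (x + 1)]
    have hd : row.drop x = row[x] :: row.drop (x + 1) := List.drop_eq_getElem_cons h1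
    have hne : row[x] ≠ 0 := by rwa [List.getD_eq_getElem _ _ h1] at h2
    rw [hd, List.takeWhile_cons_of_pos (by simpa using hne)]
    simp; omega
  next h =>
    by_cases hx : x < row.length
    · have h2 : row.getD x 0 = 0 := by
        by_contra hc; exact h ⟨hx, hc⟩
      have hd : row.drop x = row[x] :: row.drop (x + 1) := List.drop_eq_getElem_cons hx
      have hz : row[x] = 0 := by rwa [List.getD_eq_getElem _ _ hx] at h2
      rw [hd, List.takeWhile_cons_of_neg (by simp [hz])]
      simp
    · rw [List.drop_eq_nil_of_le (by omega)]; simp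
termination_by row.length - x
decreasing_by omega

theorem outer_eq (y : Int) (row : List Int) (runs : List (Int × Int × Int)) (x : Nat) :
    to_runs_outer y row runs x = runs ++ paRuns y x (row.drop x) := by
  rw [to_runs_outer]
  split
  next h =>
    have hd : row.drop x = row[x] :: row.drop (x + 1) := List.drop_eq_getElem_cons h
    split
    next h2 =>
      have hne : row[x] ≠ 0 := by rwa [List.getD_eq_getElem _ _ h] at h2
      have hgt := to_runs_inner_gt row x h h2
      rw [outer_eq y row _ (to_runs_inner row x)]
      have hin := inner_spec row x
      rw [hd] at hin
      rw [List.takeWhile_cons_of_pos (by simpa using hne)] at hin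
      set k := ((row.drop (x + 1)).takeWhile (· != 0)).length with hk
      rw [hd, paRuns]
      rw [if_neg hne, ← hk]
      have hx' : to_runs_inner row x = x + 1 + k := by simp only [List.length_cons] at hin; omega
      have hdd : (row.drop (x + 1)).drop k = row.drop (x + 1 + k) := by
        rw [List.drop_drop]
      rw [List.append_assoc]
      congr 1
      simp only [List.singleton_append]
      rw [hx', hdd]
      congr 2
      push_cast
      congr 1
      omega
    next h2 =>
      have hz : row[x] = 0 := by
        have h2' : row.getD x 0 = 0 := not_not.mp h2
        rwa [List.getD_eq_getElem _ _ h] at h2'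
      rw [outer_eq y row runs (x + 1), hd, paRuns, if_pos hz]
  next h =>
    rw [List.drop_eq_nil_of_le (by omega)]
    simp [paRuns]
termination_by row.length - x
decreasing_by
  all_goals omega

theorem rows_eq (l : List (Int × List Int)) (rs : List (Int × Int × Int)) :
    l.foldl (fun runs p => to_runs_outer p.1 p.2 runs 0) rs
      = l.foldl
          (fun runs p =>
            let y := p.1
            let row := p.2
            let xs := (PySem.List.enumerate row 0).filterMap
              (fun q => if q.2 ≠ 0 then some q.1 else none)
            let starts := ((none :: xs.map some).zip xs).filterMap
              (fun q => if q.1 ≠ some (q.2 - 1) then some q.2 else none)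
            let ends := (xs.zip (xs.tail.map some ++ [none])).filterMap
              (fun q => if q.2 ≠ some (q.1 + 1) then some q.1 else none)
            runs ++ (starts.zip ends).map (fun q => (y, q.1, q.2)))
          rs := by
  induction l generalizing rs with
  | nil => rfl
  | cons p t ih =>
    simp only [List.foldl_cons]
    rw [ih]
    congr 1
    have hA := outer_eq p.1 p.2 rs 0
    rw [List.drop_zero] at hA
    rw [hA]
    congr 1
    have hxs := enum_filter p.2 0
    push_cast at hxs
    rw [hxs, zipS _ none, zipE _]
    exact (pvRow_eq p.1 p.2 0).symm

-- ===== VERDICT =====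
theorem to_runs_spec : Claim_equal_to_runs := by
  intro bitmap _
  unfold Spec_to_runs to_runs to_runs_alt
  exact rows_eq (PySem.List.enumerate bitmap 0) []
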